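-- pv_equiv track=rewrite | github.com/gillerick/coding-challenges-python | 29. reverse_special_characters.py | reverse_string_special_characters
-- ===== SOURCE A (Python) =====
-- def reverse_string_special_characters(s):
--     s = list(s)
--     i, j = 0, len(s) - 1
--     special = "%&*"
--     while i < j:
--         if s[i] in special:
--             i += 1
--         elif s[j] in special:
--             j -= 1
--         else:
--             s[i], s[j] = s[j], s[i]
--             i += 1
--             j -= 1
--     return "".join(s)
-- ===== SOURCE B (Python) =====
-- def reverse_string_special_characters(s):
--     special = "%&*"
--     rev = [c for c in s if c not in special]
--     rev.reverse()
--     it = iter(rev)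
--     return "".join(c if c in special else next(it) for c in s)
-- ===== Notes on version B (the rewrite author's own statement) =====
-- stated objective: simpler
-- what changed: Replaces the in-place converging two-pointer swap loop by two passes: collect and reverse the non-special characters, then rebuild the string left to right, keeping the special characters in place and drawing the others from the reversed list.
import Mathlib
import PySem

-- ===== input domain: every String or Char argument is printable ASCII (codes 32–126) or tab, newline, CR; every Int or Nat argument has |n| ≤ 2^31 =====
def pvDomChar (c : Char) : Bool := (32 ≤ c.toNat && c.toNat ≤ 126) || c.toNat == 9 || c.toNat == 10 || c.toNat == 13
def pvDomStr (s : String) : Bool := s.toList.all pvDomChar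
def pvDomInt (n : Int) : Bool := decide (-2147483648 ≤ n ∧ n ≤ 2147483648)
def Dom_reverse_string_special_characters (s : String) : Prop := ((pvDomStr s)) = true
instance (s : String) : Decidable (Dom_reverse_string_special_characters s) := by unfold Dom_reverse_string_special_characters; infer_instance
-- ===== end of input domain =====

-- B replaces A's in-place converging two-pointer swap loop by two passes (collect-and-reverse
-- the non-special characters, then rebuild left to right), for simplicity; same O(n) cost.

-- ===== PORT A =====
-- `c in "%&*"` (shared by both ports)
def pvSpecial (c : Char) : Bool := c = '%' || c = '&' || c = '*'

-- A's while-loop: i, j are list indices; during the loop 0 ≤ i < j < s.length, so the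
-- `getD … ' '` default is never consulted (Python never raises here).
def pvLoopA (s : List Char) (i j : Nat) : List Char :=
  if h : i < j then
    if pvSpecial (s.getD i ' ') then pvLoopA s (i + 1) j
    else if pvSpecial (s.getD j ' ') then pvLoopA s i (j - 1)
    else pvLoopA ((s.set i (s.getD j ' ')).set j (s.getD i ' ')) (i + 1) (j - 1)
  else s
termination_by j - i
decreasing_by all_goals omega

-- Python's `len(s) - 1` is -1 on the empty string; Nat's `0 - 1 = 0` makes the loop guard
-- `0 < 0` false exactly as Python's `0 < -1` is false, so behaviour agrees.
def reverse_string_special_characters (s : String) : String :=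
  String.mk (pvLoopA s.toList 0 (s.toList.length - 1))

-- ===== PORT B =====
-- `"".join(c if c in special else next(it) for c in s)`: rebuild, drawing non-specials from r;
-- r always has a non-special element left when needed, so the `headD … ' '` default is never used.
def pvFill (xs r : List Char) : List Char :=
  match xs with
  | [] => []
  | c :: t => if pvSpecial c then c :: pvFill t r else r.headD ' ' :: pvFill t r.tail

def reverse_string_special_characters_alt (s : String) : String :=
  String.mk (pvFill s.toList ((s.toList.filter (fun c => !pvSpecial c)).reverse))

-- ===== PRECONDITION & SPEC =====
def Spec_reverse_string_special_characters (s : String) (out : String) : Prop := out = reverse_string_special_characters_alt s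
instance (s : String) (out : String) : Decidable (Spec_reverse_string_special_characters s out) := by unfold Spec_reverse_string_special_characters; infer_instance

-- ===== CLAIM (what is proved, stated in full; the proofs are below) =====
def Claim_equal_reverse_string_special_characters : Prop := ∀ (s : String), Dom_reverse_string_special_characters s → Spec_reverse_string_special_characters s (reverse_string_special_characters s)

-- ===== LEMMAS AND PROOFS =====

-- B's whole computation on a character list, as one function of the list
def pvF (m : List Char) : List Char :=
  pvFill m ((m.filter (fun c => !pvSpecial c)).reverse)

lemma pvFill_append_special (b : Char) (hb : pvSpecial b = true) :
    ∀ (u r : List Char), pvFill (u ++ [b]) r = pvFill u r ++ [b] := by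
  intro u
  induction u with
  | nil => intro r; simp [pvFill, hb]
  | cons c t ih =>
      intro r
      by_cases hc : pvSpecial c = true <;> simp [pvFill, hc, ih]

lemma pvFill_append_nonspecial (a b : Char) (hb : pvSpecial b = false) :
    ∀ (mid r : List Char), r.length = (mid.filter (fun c => !pvSpecial c)).length →
      pvFill (mid ++ [b]) (r ++ [a]) = pvFill mid r ++ [a] := by
  intro mid
  induction mid with
  | nil =>
      intro r hr
      simp at hr
      subst hr
      simp [pvFill, hb]
  | cons c t ih =>
      intro r hr
      by_cases hc : pvSpecial c = true
      · simpa [pvFill, hc] using ih r (by simpa [hc] using hr)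
      · cases r with
        | nil => simp [hc] at hr
        | cons d r' =>
            simp only [List.cons_append, pvFill, hc, Bool.false_eq_true, if_false,
              List.headD_cons, List.tail_cons]
            exact congrArg (d :: ·) (ih r' (by simpa [hc] using hr))

lemma pvF_singleton (a : Char) : pvF [a] = [a] := by
  by_cases ha : pvSpecial a = true <;> simp [pvF, pvFill, ha]

lemma pvF_special_head (a : Char) (ha : pvSpecial a = true) (t : List Char) :
    pvF (a :: t) = a :: pvF t := by
  simp [pvF, pvFill, ha]

lemma pvF_special_last (u : List Char) (b : Char) (hb : pvSpecial b = true) :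
    pvF (u ++ [b]) = pvF u ++ [b] := by
  simp [pvF, hb, pvFill_append_special b hb]

lemma pvF_swap (a b : Char) (ha : pvSpecial a = false) (hb : pvSpecial b = false)
    (mid : List Char) :
    pvF (a :: (mid ++ [b])) = b :: (pvF mid ++ [a]) := by
  have hfil : (((a :: (mid ++ [b])).filter (fun c => !pvSpecial c)).reverse)
      = (b :: ((mid.filter (fun c => !pvSpecial c)).reverse ++ [a])) := by
    simp [ha, hb, List.filter_append]
  show pvFill (a :: (mid ++ [b])) _ = _
  rw [hfil]
  simp only [pvFill, ha, Bool.false_eq_true, if_false, List.headD_cons, List.tail_cons]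
  exact congrArg (b :: ·) (pvFill_append_nonspecial a b hb mid _ (by simp))

-- getD at the head of the middle segment
lemma getD_mid_head (p q : List Char) (a : Char) (t : List Char) :
    (p ++ (a :: t) ++ q).getD p.length ' ' = a := by
  rw [List.append_assoc, List.getD_append_right p _ ' ' p.length le_rfl]
  simp

-- getD at the last position of the middle segment
lemma getD_mid_last (p q : List Char) (a b : Char) (mid : List Char) :
    (p ++ (a :: (mid ++ [b])) ++ q).getD (p.length + (mid.length + 1)) ' ' = b := by
  rw [List.append_assoc, List.getD_append_right p _ ' ' _ (by omega),
    Nat.add_sub_cancel_left]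
  rw [List.getD_append _ q ' ' _ (by simp)]
  rw [List.getD_cons_succ, List.getD_append_right mid _ ' ' _ le_rfl,
    Nat.sub_self, List.getD_cons_zero]

-- the double set of the swap branch
lemma set_swap (p q : List Char) (a b : Char) (mid : List Char) :
    ((p ++ (a :: (mid ++ [b])) ++ q).set p.length b).set (p.length + (mid.length + 1)) a
      = (p ++ [b]) ++ mid ++ ([a] ++ q) := by
  rw [List.append_assoc, List.set_append_right p.length b le_rfl, Nat.sub_self]
  show (p ++ (b :: (mid ++ [b] ++ q))).set _ a = _
  rw [List.set_append_right _ a (by omega), Nat.add_sub_cancel_left, List.set_cons_succ,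
    List.append_assoc mid, List.set_append_right mid.length a le_rfl, Nat.sub_self]
  simp

-- MAIN INVARIANT: the two-pointer loop on p ++ m ++ q, with i at the start of m and j at its
-- end, leaves p and q alone and turns m into pvF m (B's value on m).
lemma pvLoopA_main : ∀ (n : Nat) (m p q : List Char), m.length ≤ n →
    pvLoopA (p ++ m ++ q) p.length (p.length + m.length - 1) = p ++ pvF m ++ q := by
  intro n
  induction n with
  | zero =>
      intro m p q hm
      have : m = [] := List.length_eq_zero_iff.mp (Nat.le_zero.mp hm)
      subst this
      rw [pvLoopA, dif_neg (by simp)]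
      simp [pvF, pvFill]
  | succ n ih =>
      intro m p q hm
      match m with
      | [] =>
          rw [pvLoopA, dif_neg (by simp)]
          simp [pvF, pvFill]
      | a :: t =>
          rcases t.eq_nil_or_concat with rfl | ⟨mid, b, hmb⟩
          · -- m = [a] : the guard p.length < p.length is false
            rw [pvLoopA, dif_neg (by simp), pvF_singleton]
          · -- m = a :: mid ++ [b], at least two characters: the loop runs
            rw [List.concat_eq_append] at hmb
            subst hmb
            have hguard : p.length < p.length + (a :: (mid ++ [b])).length - 1 := by
              simp
            have hj : p.length + (a :: (mid ++ [b])).length - 1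
                = p.length + (mid.length + 1) := by simp
            have hga := getD_mid_head p q a (mid ++ [b])
            have hgb := getD_mid_last p q a b mid
            rw [pvLoopA, dif_pos hguard, hj, hga, hgb]
            by_cases hsa : pvSpecial a = true
            · -- skip the special head: i + 1
              rw [if_pos hsa]
              have h1 : p ++ (a :: (mid ++ [b])) ++ q
                  = (p ++ [a]) ++ (mid ++ [b]) ++ q := by simp
              have h2 : pvLoopA ((p ++ [a]) ++ (mid ++ [b]) ++ q) (p.length + 1)
                    (p.length + (mid.length + 1))
                  = pvLoopA ((p ++ [a]) ++ (mid ++ [b]) ++ q) (p ++ [a]).length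
                    ((p ++ [a]).length + (mid ++ [b]).length - 1) := by
                congr 1 <;> simp only [List.length_append, List.length_cons,
                  List.length_nil] <;> omega
              rw [h1, h2, ih (mid ++ [b]) (p ++ [a]) q (by simp at hm ⊢; omega)]
              rw [pvF_special_head a hsa]
              simp
            · rw [if_neg hsa]
              by_cases hsb : pvSpecial b = true
              · -- skip the special last: j - 1
                rw [if_pos hsb]
                have h1 : p ++ (a :: (mid ++ [b])) ++ q
                    = p ++ (a :: mid) ++ ([b] ++ q) := by simp
                have h2 : p.length + (mid.length + 1) - 1
                    = p.length + (a :: mid).length - 1 := by simp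
                rw [h1, h2, ih (a :: mid) p ([b] ++ q) (by simp at hm ⊢; omega)]
                rw [show a :: (mid ++ [b]) = (a :: mid) ++ [b] by simp,
                  pvF_special_last (a :: mid) b hsb]
                simp
              · -- swap a and b, then shrink both ends
                rw [if_neg hsb]
                rw [set_swap p q a b mid]
                have h2 : pvLoopA ((p ++ [b]) ++ mid ++ ([a] ++ q)) (p.length + 1)
                      (p.length + (mid.length + 1) - 1)
                    = pvLoopA ((p ++ [b]) ++ mid ++ ([a] ++ q)) (p ++ [b]).length
                      ((p ++ [b]).length + mid.length - 1) := by
                  congr 1 <;> simp only [List.length_append, List.length_cons,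
                    List.length_nil] <;> omega
                rw [h2, ih mid (p ++ [b]) ([a] ++ q) (by simp at hm ⊢; omega)]
                rw [pvF_swap a b (by simpa using hsa) (by simpa using hsb) mid]
                simp

-- ===== VERDICT (by name: the statement is the Claim_ definition above) =====
theorem reverse_string_special_characters_spec : Claim_equal_reverse_string_special_characters := by
  intro s _
  show _ = _
  unfold reverse_string_special_characters reverse_string_special_characters_alt
  have h := pvLoopA_main s.toList.length s.toList [] [] le_rfl
  simp only [List.nil_append, List.append_nil, List.length_nil, Nat.zero_add] at h
  rw [h]
  rfl
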